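-- pv_equiv track=rewrite | github.com/openalea-incubator/lgrass | soil3ds/IOtable.py | extract_dataframe
-- ===== SOURCE A (Python) =====
-- def extract_dataframe(dat, ls_cles, cle, val=None, oper='egal'):
--     """ extrait dans listes de cles ls_cles les lignes pour lesquelles cle=val; toutes si val=None
--     option pour oper: egal / sup / inf/ supeg / infeg / diff"""
--     #cree liste d'index ou cle = val
--
--     id = []
--     for i in range(len(dat[cle])):
--         if val == None:
--             id.append(i)
--         else:
--             if oper =='egal':
--                 if dat[cle][i] == val:
--                     id.append(i)
--             elif oper =='inf':
--                 if dat[cle][i] < val: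
--                     id.append(i)
--             elif oper =='sup':
--                 if dat[cle][i] > val:
--                     id.append(i)
--             elif oper =='infeg':
--                 if dat[cle][i] <= val:
--                     id.append(i)
--             elif oper =='supeg':
--                 if dat[cle][i] >= val:
--                     id.append(i)
--             elif oper =='diff':
--                 if dat[cle][i] != val:
--                     id.append(i)
--
--     x = {}
--     for k in ls_cles: # recupere les paires interessantes
--         v = []
--         for i in id: # les id respectant cle=val
--             v.append(dat[k][i])
--
--         x[k] = v
--
--     return x
-- ===== SOURCE B (Python) =====
-- def _comparator(val, oper):
--     """Build the row predicate once: accept-all when val is None, else the comparator named by oper (unknown oper matches nothing)."""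
--     if val is None:
--         return lambda a: True
--     tests = {'egal': lambda a: a == val, 'inf': lambda a: a < val,
--              'sup': lambda a: a > val, 'infeg': lambda a: a <= val,
--              'supeg': lambda a: a >= val, 'diff': lambda a: a != val}
--     return tests.get(oper, lambda a: False)
--
--
-- def extract_dataframe(dat, ls_cles, cle, val=None, oper='egal'):
--     keep = _comparator(val, oper)
--     x = {k: [] for k in ls_cles}
--     for i in range(len(dat[cle])):
--         if keep(dat[cle][i]):
--             for k in x:
--                 x[k].append(dat[k][i])
--     return x
-- ===== Notes on version B (the rewrite author's own statement) =====
-- stated objective: alternative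
-- what changed: Replaces A's two-pass structure (build an index list of matching rows, then for each requested column re-scan that list to gather values) with a single fused row scan: the comparator is chosen once up front, the result columns are initialised empty, and one pass over the rows appends the row's values to every selected column, so no intermediate index list is ever built.
import Mathlib
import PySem

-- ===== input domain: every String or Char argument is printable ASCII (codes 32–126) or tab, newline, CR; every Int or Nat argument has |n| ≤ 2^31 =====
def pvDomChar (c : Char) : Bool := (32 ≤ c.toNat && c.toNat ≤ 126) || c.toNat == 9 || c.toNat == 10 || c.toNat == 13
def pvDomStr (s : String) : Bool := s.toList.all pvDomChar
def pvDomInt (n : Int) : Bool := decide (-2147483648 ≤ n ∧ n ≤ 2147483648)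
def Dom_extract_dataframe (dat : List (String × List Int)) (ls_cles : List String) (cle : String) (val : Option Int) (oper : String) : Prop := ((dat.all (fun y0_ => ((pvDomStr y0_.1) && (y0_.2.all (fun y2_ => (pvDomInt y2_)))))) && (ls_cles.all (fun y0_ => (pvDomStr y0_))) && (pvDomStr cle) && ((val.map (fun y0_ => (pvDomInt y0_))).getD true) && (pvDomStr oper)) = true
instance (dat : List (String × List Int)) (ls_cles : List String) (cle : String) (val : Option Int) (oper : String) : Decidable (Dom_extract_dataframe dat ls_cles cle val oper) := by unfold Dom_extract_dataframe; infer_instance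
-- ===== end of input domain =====

-- B fuses A's two passes (build an index list, then gather per column) into one row scan with the
-- comparator chosen once up front; equivalence of the returned association lists is proved on Pre_.

-- ===== PORT A =====
-- literal transliteration of A: first build the index list `id` of matching rows,
-- then for each requested key gather dat[k][i] for i in id into a fresh list and store it.
def extract_dataframe (dat : List (String × List Int)) (ls_cles : List String) (cle : String) (val : Option Int) (oper : String) : List (String × List Int) :=
  let d := PySem.Dict.mk dat
  let col := (d.get? cle).getD []          -- dat[cle]; Pre_ guarantees the key exists
  let ids : List Int := (PySem.List.pyRange 0 (PySem.List.len col) 1).foldl (fun id i =>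
    match val with
    | none => id ++ [i]
    | some v =>
      let a := PySem.List.pyGetD col i 0   -- dat[cle][i]; i is in range by construction
      if oper == "egal" then (if a == v then id ++ [i] else id)
      else if oper == "inf" then (if a < v then id ++ [i] else id)
      else if oper == "sup" then (if a > v then id ++ [i] else id)
      else if oper == "infeg" then (if a ≤ v then id ++ [i] else id)
      else if oper == "supeg" then (if a ≥ v then id ++ [i] else id)
      else if oper == "diff" then (if a != v then id ++ [i] else id)
      else id) []
  let x := ls_cles.foldl (fun x k =>
    let colk := (d.get? k).getD []         -- dat[k]; Pre_ guarantees presence when ids ≠ []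
    let v := ids.foldl (fun v i => v ++ [PySem.List.pyGetD colk i 0]) []   -- in range under Pre_
    x.insert k v) PySem.Dict.empty
  x.items

-- ===== PORT B =====
-- B-side helper: port of Source B's _comparator (the dict-of-lambdas lookup with accept-all / match-nothing defaults)
def pvKeep (val : Option Int) (oper : String) : Int → Bool :=
  match val with
  | none => fun _ => true
  | some v =>
    if oper == "egal" then fun a => a == v
    else if oper == "inf" then fun a => decide (a < v)
    else if oper == "sup" then fun a => decide (a > v)
    else if oper == "infeg" then fun a => decide (a ≤ v)
    else if oper == "supeg" then fun a => decide (a ≥ v)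
    else if oper == "diff" then fun a => a != v
    else fun _ => false

-- literal transliteration of B: comparator chosen once, result columns initialised empty
-- ({k: [] for k in ls_cles} dedups keys in first-occurrence order), one fused pass over the rows.
def extract_dataframe_alt (dat : List (String × List Int)) (ls_cles : List String) (cle : String) (val : Option Int) (oper : String) : List (String × List Int) :=
  let d := PySem.Dict.mk dat
  let keep := pvKeep val oper
  let col := (d.get? cle).getD []          -- dat[cle]; Pre_ guarantees the key exists
  let x0 : List (String × List Int) := (PySem.List.dedup ls_cles).map (fun k => (k, ([] : List Int)))
  (PySem.List.pyRange 0 (PySem.List.len col) 1).foldl (fun x i =>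
    if keep (PySem.List.pyGetD col i 0)
    then x.map (fun p => (p.1, p.2 ++ [PySem.List.pyGetD ((d.get? p.1).getD []) i 0]))
    else x) x0

-- ===== PRECONDITION & SPEC =====
-- Pre_ excludes exactly the inputs where the Python A raises: KeyError when cle is not a key of dat,
-- and KeyError/IndexError when some requested key is missing or its column too short at a matching row index.
def Pre_extract_dataframe (dat : List (String × List Int)) (ls_cles : List String) (cle : String) (val : Option Int) (oper : String) : Prop :=
  ((PySem.Dict.mk dat).get? cle).isSome = true ∧
  ∀ k ∈ ls_cles, ∀ i < (((PySem.Dict.mk dat).get? cle).getD []).length,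
    pvKeep val oper ((((PySem.Dict.mk dat).get? cle).getD []).getD i 0) = true →
    ((PySem.Dict.mk dat).get? k).isSome = true ∧ i < (((PySem.Dict.mk dat).get? k).getD []).length
instance (dat : List (String × List Int)) (ls_cles : List String) (cle : String) (val : Option Int) (oper : String) : Decidable (Pre_extract_dataframe dat ls_cles cle val oper) := by unfold Pre_extract_dataframe; infer_instance

def pvWitness_extract_dataframe : (List (String × List Int)) × List String × String × Option Int × String :=
  ([("a", [1, 2, 1]), ("b", [10, 20, 30])], ["b", "a"], "a", some 1, "egal")

def Spec_extract_dataframe (dat : List (String × List Int)) (ls_cles : List String) (cle : String) (val : Option Int) (oper : String) (out : List (String × List Int)) : Prop := out = extract_dataframe_alt dat ls_cles cle val oper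
instance (dat : List (String × List Int)) (ls_cles : List String) (cle : String) (val : Option Int) (oper : String) (out : List (String × List Int)) : Decidable (Spec_extract_dataframe dat ls_cles cle val oper out) := by unfold Spec_extract_dataframe; infer_instance

-- ===== CLAIM (what is proved, stated in full; the proofs are below) =====
def Claim_equal_extract_dataframe : Prop := ∀ (dat : List (String × List Int)) (ls_cles : List String) (cle : String) (val : Option Int) (oper : String), Dom_extract_dataframe dat ls_cles cle val oper → Pre_extract_dataframe dat ls_cles cle val oper → Spec_extract_dataframe dat ls_cles cle val oper (extract_dataframe dat ls_cles cle val oper)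

-- ===== LEMMAS AND PROOFS =====

-- A's inline if/elif comparison chain computes pvKeep val oper applied to the row value.
theorem stepA_eq (val : Option Int) (oper : String) (col : List Int) :
    (fun (id : List Int) (i : Int) =>
      match val, i with
      | none, i => id ++ [i]
      | some v, i =>
        if oper == "egal" then (if PySem.List.pyGetD col i 0 == v then id ++ [i] else id)
        else if oper == "inf" then (if PySem.List.pyGetD col i 0 < v then id ++ [i] else id)
        else if oper == "sup" then (if PySem.List.pyGetD col i 0 > v then id ++ [i] else id)
        else if oper == "infeg" then (if PySem.List.pyGetD col i 0 ≤ v then id ++ [i] else id)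
        else if oper == "supeg" then (if PySem.List.pyGetD col i 0 ≥ v then id ++ [i] else id)
        else if oper == "diff" then (if PySem.List.pyGetD col i 0 != v then id ++ [i] else id)
        else id)
    = fun id i => if pvKeep val oper (PySem.List.pyGetD col i 0) then id ++ [i] else id := by
  funext id i
  cases val with
  | none => simp [pvKeep]
  | some v => simp only [pvKeep]; split_ifs <;> simp_all <;> omega

-- value of a key-indexed insert loop: untouched keys keep their value …
theorem getD_foldl_insert_fn_not_mem (g : String → List Int) (l : List String)
    (d : PySem.Dict String (List Int)) (k : String) (h : k ∉ l) :
    (l.foldl (fun x k' => x.insert k' (g k')) d).getD k [] = d.getD k [] := by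
  induction l generalizing d with
  | nil => rfl
  | cons a t ih =>
    simp only [List.foldl_cons]
    rw [ih _ (fun hm => h (List.mem_cons_of_mem a hm)), PySem.Dict.getD_insert,
        if_neg (fun he : k = a => h (he ▸ List.mem_cons_self))]

-- … and every key of the list ends at its (key-determined) value.
theorem getD_foldl_insert_fn_mem (g : String → List Int) (l : List String)
    (d : PySem.Dict String (List Int)) (k : String) (h : k ∈ l) :
    (l.foldl (fun x k' => x.insert k' (g k')) d).getD k [] = g k := by
  induction l generalizing d with
  | nil => cases h
  | cons a t ih =>
    simp only [List.foldl_cons]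
    by_cases ht : k ∈ t
    · exact ih _ ht
    · have hk : k = a := (List.mem_cons.mp h).resolve_right ht
      rw [getD_foldl_insert_fn_not_mem g t _ k ht, hk, PySem.Dict.getD_insert_self]

-- B's fused row loop, characterised: it appends to each column exactly the values at the rows the predicate keeps.
theorem foldl_map_append_filter {α κ ν : Type} (q : α → Bool) (g : κ → α → ν) (L : List α) :
    ∀ (x0 : List (κ × List ν)),
    L.foldl (fun x i => if q i then x.map (fun p => (p.1, p.2 ++ [g p.1 i])) else x) x0
      = x0.map (fun p => (p.1, p.2 ++ (L.filter q).map (g p.1))) := by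
  induction L with
  | nil => intro x0; simp
  | cons i L ih =>
    intro x0
    simp only [List.foldl_cons]
    cases hq : q i with
    | false => simp [hq, ih]
    | true => simp [hq, ih, List.map_map, Function.comp_def]

-- A returns the keys of ls_cles deduped in first-occurrence order, each paired with the gathered matching rows …
theorem extract_dataframe_characterisation (dat : List (String × List Int)) (ls_cles : List String)
    (cle : String) (val : Option Int) (oper : String) :
    extract_dataframe dat ls_cles cle val oper
      = (PySem.List.dedup ls_cles).map (fun k =>
          (k, ((PySem.List.pyRange 0 (PySem.List.len (((PySem.Dict.mk dat).get? cle).getD [])) 1).filter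
                 (fun i => pvKeep val oper (PySem.List.pyGetD (((PySem.Dict.mk dat).get? cle).getD []) i 0))).map
                (fun i => PySem.List.pyGetD (((PySem.Dict.mk dat).get? k).getD []) i 0))) := by
  simp only [extract_dataframe]
  rw [stepA_eq]
  rw [PySem.List.foldl_append_if_eq_filter]
  simp only [PySem.List.foldl_append_singleton_eq_map, List.nil_append]
  set d := PySem.Dict.mk dat
  set ids := (PySem.List.pyRange 0 (PySem.List.len ((d.get? cle).getD [])) 1).filter
      (fun i => pvKeep val oper (PySem.List.pyGetD ((d.get? cle).getD []) i 0)) with hids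
  set g : String → List Int := fun k => ids.map (fun i => PySem.List.pyGetD ((d.get? k).getD []) i 0) with hg
  have hfold : (ls_cles.foldl (fun x k => x.insert k (ids.map (fun i => PySem.List.pyGetD ((d.get? k).getD []) i 0))) PySem.Dict.empty)
      = ls_cles.foldl (fun x k => x.insert k (g k)) PySem.Dict.empty := rfl
  rw [hfold]
  have hnodup : (ls_cles.foldl (fun x k => x.insert k (g k)) PySem.Dict.empty).keys.Nodup :=
    PySem.Dict.nodup_keys_foldl_insert ls_cles (fun _ k => g k) PySem.Dict.empty
      PySem.Dict.nodup_keys_empty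
  rw [PySem.Dict.items_eq_map_keys _ hnodup []]
  have hkeys : (ls_cles.foldl (fun x k => x.insert k (g k)) PySem.Dict.empty).keys
      = PySem.List.dedup ls_cles := by
    rw [PySem.Dict.keys_foldl_insert, PySem.Dict.keys_empty, PySem.Set.update_nil_left,
        PySem.List.dedup_eq_ofList]
  rw [hkeys]
  refine List.map_congr_left (fun k hk => ?_)
  have hkm : k ∈ ls_cles := by simp [pysem] at hk; exact hk
  rw [getD_foldl_insert_fn_mem g ls_cles _ k hkm]

-- … and B computes exactly the same association list.
theorem extract_dataframe_alt_characterisation (dat : List (String × List Int)) (ls_cles : List String)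
    (cle : String) (val : Option Int) (oper : String) :
    extract_dataframe_alt dat ls_cles cle val oper
      = (PySem.List.dedup ls_cles).map (fun k =>
          (k, ((PySem.List.pyRange 0 (PySem.List.len (((PySem.Dict.mk dat).get? cle).getD [])) 1).filter
                 (fun i => pvKeep val oper (PySem.List.pyGetD (((PySem.Dict.mk dat).get? cle).getD []) i 0))).map
                (fun i => PySem.List.pyGetD (((PySem.Dict.mk dat).get? k).getD []) i 0))) := by
  simp only [extract_dataframe_alt]
  rw [foldl_map_append_filter
        (fun i => pvKeep val oper (PySem.List.pyGetD (((PySem.Dict.mk dat).get? cle).getD []) i 0))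
        (fun k i => PySem.List.pyGetD (((PySem.Dict.mk dat).get? k).getD []) i 0)]
  simp [List.map_map, Function.comp_def]

-- ===== VERDICT (by name: the statement is the Claim_ definition above) =====
theorem extract_dataframe_spec : Claim_equal_extract_dataframe := by
  intro dat ls_cles cle val oper _ _
  unfold Spec_extract_dataframe
  rw [extract_dataframe_characterisation, extract_dataframe_alt_characterisation]
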